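-- pv_equiv track=rewrite | github.com/flashman/code-samples | benchling/q11/q11.py | generate_all_proteins
-- ===== SOURCE A (Python) =====
-- def generate_all_proteins(sequences):
--     # Index start positions and share.
--     sequence_map = {}
--     for s in sequences:
--         start = s[1]
--         if start in sequence_map:
--             sequence_map[start].append(s)
--         else:
--             sequence_map[start] = [s]
--     # Run main generator.
--     yield from _generate(sequences, sequence_map)
--
-- def _generate(sequences, sequence_map):
--     next_sequnces = []
--     for seq in sequences:
--         yield seq
--         end = seq[2]
--         if end in sequence_map:
--             for next_seq in sequence_map[end]:
--                 next_sequnces.append(_reduce(seq, next_seq))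
--
--     if next_sequnces:
--         yield from _generate(next_sequnces, sequence_map)
--
-- def _reduce(base, seq):
--     return (base[0] + "_" + seq[0], base[1], seq[2])
-- ===== SOURCE B (Python) =====
-- def generate_all_proteins(sequences):
--     # Index start positions and share.
--     sequence_map = {}
--     for s in sequences:
--         start = s[1]
--         if start in sequence_map:
--             sequence_map[start].append(s)
--         else:
--             sequence_map[start] = [s]
--     # Iterative breadth-first traversal: the list doubles as a FIFO queue;
--     # every yielded sequence appends its one-step extensions to the back.
--     queue = list(sequences)
--     i = 0
--     while i < len(queue):
--         seq = queue[i]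
--         i += 1
--         yield seq
--         for next_seq in sequence_map.get(seq[2], []):
--             queue.append((seq[0] + "_" + next_seq[0], seq[1], next_seq[2]))
-- ===== Notes on version B (the rewrite author's own statement) =====
-- stated objective: idiomatic
-- what changed: The level-by-level recursive generator _generate is replaced by a single iterative breadth-first loop: the output list itself serves as a FIFO queue (read cursor + append), which emits the identical stream without recursion or per-level buffers.
import Mathlib
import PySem

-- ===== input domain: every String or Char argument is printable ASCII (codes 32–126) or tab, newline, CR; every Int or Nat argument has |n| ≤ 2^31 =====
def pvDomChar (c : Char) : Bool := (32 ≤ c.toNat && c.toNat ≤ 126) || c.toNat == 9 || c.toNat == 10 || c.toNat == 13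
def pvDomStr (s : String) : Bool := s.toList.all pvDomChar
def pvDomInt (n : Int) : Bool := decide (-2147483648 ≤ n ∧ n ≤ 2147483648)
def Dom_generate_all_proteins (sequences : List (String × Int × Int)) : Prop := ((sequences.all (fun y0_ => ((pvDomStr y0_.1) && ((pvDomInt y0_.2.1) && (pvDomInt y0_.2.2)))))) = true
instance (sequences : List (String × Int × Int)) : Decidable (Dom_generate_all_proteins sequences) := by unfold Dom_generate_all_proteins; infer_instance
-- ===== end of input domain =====

-- B replaces the recursive level generator by an iterative FIFO-queue loop (same stream, no recursion); equivalence is about the fully materialised output list.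

-- ===== PORT A =====
-- shared helper: the literal 'sequence_map' building loop (identical lines in Source A and Source B)
def pvBuildMap (sequences : List (String × Int × Int)) : PySem.Dict Int (List (String × Int × Int)) :=
  sequences.foldl (fun d s =>
    if d.contains s.2.1 then d.modify s.2.1 [] (fun b => b ++ [s]) else d.insert s.2.1 [s])
    PySem.Dict.empty

-- _generate: yields the level, collects next_sequnces, recurses while nonempty.
-- fuel (sequences.length + 1) is a totality guard only; Pre_ proves it is never exhausted.
def pvGenA (m : PySem.Dict Int (List (String × Int × Int))) :
    Nat → List (String × Int × Int) → List (String × Int × Int)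
  | 0, _ => []
  | f + 1, l =>
    let nxt := l.foldl (fun acc seq =>
      if m.contains seq.2.2 then
        acc ++ (m.getD seq.2.2 []).map (fun t => (seq.1 ++ "_" ++ t.1, seq.2.1, t.2.2))
      else acc) []
    l ++ (if nxt = [] then [] else pvGenA m f nxt)

def generate_all_proteins (sequences : List (String × Int × Int)) : List (String × Int × Int) :=
  pvGenA (pvBuildMap sequences) (sequences.length + 1) sequences

-- ===== PORT B =====
-- fuel bound for the queue loop (one unit per pop); a totality guard only
def pvFuelB (n : Nat) : Nat → Nat → Nat
  | 0, L => L
  | m + 1, L => L + pvFuelB n m (L * n)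

-- while i < len(queue): yield queue[i]; i += 1; append extensions to the back
def pvBfs (m : PySem.Dict Int (List (String × Int × Int))) :
    Nat → List (String × Int × Int) → Nat → List (String × Int × Int)
  | 0, _, _ => []
  | f + 1, q, i =>
    if h : i < q.length then
      q[i] :: pvBfs m f
        (q ++ (m.getD q[i].2.2 []).map (fun t => (q[i].1 ++ "_" ++ t.1, q[i].2.1, t.2.2)))
        (i + 1)
    else []

def generate_all_proteins_alt (sequences : List (String × Int × Int)) : List (String × Int × Int) :=
  pvBfs (pvBuildMap sequences)
    (pvFuelB sequences.length sequences.length sequences.length) sequences 0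

-- ===== PRECONDITION & SPEC =====
-- pvBadIter i = the sequences from which a chain of i successor steps (t.end = u.start) starts
def pvBadStep (sequences : List (String × Int × Int)) (b : List (String × Int × Int)) :
    List (String × Int × Int) :=
  sequences.filter (fun t => b.any (fun u => t.2.2 == u.2.1))

def pvBadIter (sequences : List (String × Int × Int)) : Nat → List (String × Int × Int)
  | 0 => sequences
  | i + 1 => pvBadStep sequences (pvBadIter sequences i)

-- Pre_: the start→end successor graph on the input has no chain of `length` steps
-- (equivalently, no cycle) — exactly the inputs on which A's generator is finite.
def Pre_generate_all_proteins (sequences : List (String × Int × Int)) : Prop :=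
  pvBadIter sequences sequences.length = []
instance (sequences : List (String × Int × Int)) : Decidable (Pre_generate_all_proteins sequences) := by
  unfold Pre_generate_all_proteins; infer_instance

def pvWitness_generate_all_proteins : (List (String × Int × Int)) :=
  [("a", 0, 1), ("b", 1, 2)]

def Spec_generate_all_proteins (sequences : List (String × Int × Int)) (out : List (String × Int × Int)) : Prop := out = generate_all_proteins_alt sequences
instance (sequences : List (String × Int × Int)) (out : List (String × Int × Int)) : Decidable (Spec_generate_all_proteins sequences out) := by unfold Spec_generate_all_proteins; infer_instance

-- ===== CLAIM (what is proved, stated in full; the proofs are below) =====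
def Claim_equal_generate_all_proteins : Prop := ∀ (sequences : List (String × Int × Int)), Dom_generate_all_proteins sequences → Pre_generate_all_proteins sequences → Spec_generate_all_proteins sequences (generate_all_proteins sequences)

-- ===== LEMMAS AND PROOFS =====

-- one-step extensions of an element (proof-side view of both ports' inner loop)
def pvChild (sequences : List (String × Int × Int)) (x : String × Int × Int) :
    List (String × Int × Int) :=
  ((pvBuildMap sequences).getD x.2.2 []).map (fun t => (x.1 ++ "_" ++ t.1, x.2.1, t.2.2))

-- pop-front view of B's queue loop
def pvQrun (sequences : List (String × Int × Int)) :
    Nat → List (String × Int × Int) → List (String × Int × Int)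
  | _, [] => []
  | 0, _ :: _ => []
  | f + 1, s :: q => s :: pvQrun sequences f (q ++ pvChild sequences s)

theorem pvBuildMap_getD_aux (k : Int) :
    ∀ (l : List (String × Int × Int)) (d : PySem.Dict Int (List (String × Int × Int))),
      (l.foldl (fun d s =>
        if d.contains s.2.1 then d.modify s.2.1 [] (fun b => b ++ [s]) else d.insert s.2.1 [s]) d).getD k []
      = d.getD k [] ++ l.filter (fun t => t.2.1 == k) := by
  intro l
  induction l with
  | nil => intro d; simp
  | cons s l ih =>
    intro d
    simp only [List.foldl_cons, ih, List.filter_cons]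
    by_cases hc : d.contains s.2.1
    · simp only [hc, if_true, PySem.Dict.getD_modify]
      by_cases hk : k = s.2.1
      · simp [hk]
      · have : ¬ (s.2.1 == k) = true := by simp [beq_iff_eq]; omega
        simp [hk, this]
    · rw [if_neg hc]
      by_cases hk : k = s.2.1
      · have h0 : d.getD s.2.1 [] = [] :=
          PySem.Dict.getD_of_not_contains d [] (by simpa using hc)
        subst hk
        rw [PySem.Dict.getD_insert_self d s.2.1 [s] [], h0]
        simp
      · have hne : ¬ (s.2.1 == k) = true := by simp [beq_iff_eq]; omega
        rw [PySem.Dict.getD_insert_of_ne d [s] [] hk]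
        simp [hne]

theorem pvBuildMap_getD (sequences : List (String × Int × Int)) (k : Int) :
    (pvBuildMap sequences).getD k [] = sequences.filter (fun t => t.2.1 == k) := by
  simpa using pvBuildMap_getD_aux k sequences PySem.Dict.empty

theorem pvChild_mem (sequences : List (String × Int × Int)) (x y : String × Int × Int)
    (hy : y ∈ pvChild sequences x) :
    ∃ t ∈ sequences, t.2.1 = x.2.2 ∧ y.2.2 = t.2.2 := by
  unfold pvChild at hy
  rw [pvBuildMap_getD] at hy
  simp only [List.mem_map, List.mem_filter] at hy
  obtain ⟨t, ⟨ht, hstart⟩, rfl⟩ := hy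
  exact ⟨t, ht, by simpa using hstart, rfl⟩

theorem pvBad_step (sequences : List (String × Int × Int)) (m : Nat)
    (t : String × Int × Int) (ht : t ∈ sequences)
    (v : String × Int × Int) (hv : v ∈ pvBadIter sequences m) (he : t.2.2 = v.2.1) :
    t ∈ pvBadIter sequences (m + 1) := by
  unfold pvBadIter pvBadStep
  rw [List.mem_filter]
  exact ⟨ht, by simp only [List.any_eq_true]; exact ⟨v, hv, by simpa using he⟩⟩

def pvOk (sequences : List (String × Int × Int)) (m : Nat) (x : String × Int × Int) : Prop :=
  ∀ u ∈ sequences, u.2.1 = x.2.2 → u ∉ pvBadIter sequences m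

theorem pvOk_child (sequences : List (String × Int × Int)) (m : Nat)
    (x : String × Int × Int) (hx : pvOk sequences (m + 1) x) :
    ∀ y ∈ pvChild sequences x, pvOk sequences m y := by
  intro y hy u hu hustart hubad
  obtain ⟨t, ht, htstart, hyend⟩ := pvChild_mem sequences x y hy
  exact hx t ht htstart (pvBad_step sequences m t ht u hubad (by omega))

theorem pvOk_zero_child (sequences : List (String × Int × Int))
    (x : String × Int × Int) (hx : pvOk sequences 0 x) : pvChild sequences x = [] := by
  unfold pvChild
  rw [pvBuildMap_getD]
  have : sequences.filter (fun t => t.2.1 == x.2.2) = [] := by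
    rw [List.filter_eq_nil_iff]
    intro t ht hteq
    exact hx t ht (by simpa using hteq) ht
  rw [this]; rfl

theorem pvGenA_next (sequences : List (String × Int × Int))
    (l : List (String × Int × Int)) (acc : List (String × Int × Int)) :
    l.foldl (fun acc seq =>
      if (pvBuildMap sequences).contains seq.2.2 then
        acc ++ ((pvBuildMap sequences).getD seq.2.2 []).map
          (fun t => (seq.1 ++ "_" ++ t.1, seq.2.1, t.2.2))
      else acc) acc = acc ++ l.flatMap (pvChild sequences) := by
  induction l generalizing acc with
  | nil => simp
  | cons s l ih =>
    simp only [List.foldl_cons, List.flatMap_cons, ih]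
    by_cases hc : (pvBuildMap sequences).contains s.2.2
    · simp only [hc, if_true, pvChild, List.append_assoc]
    · have h0 : (pvBuildMap sequences).getD s.2.2 [] = [] :=
        PySem.Dict.getD_of_not_contains _ [] (by simpa using hc)
      simp only [hc, pvChild, h0, List.map_nil, List.nil_append]
      simp

theorem pvQrun_append (sequences : List (String × Int × Int)) :
    ∀ (l : List (String × Int × Int)) (f : Nat) (r : List (String × Int × Int)),
      l.length ≤ f →
      pvQrun sequences f (l ++ r) =
        l ++ pvQrun sequences (f - l.length) (r ++ l.flatMap (pvChild sequences)) := by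
  intro l
  induction l with
  | nil => intro f r _; simp
  | cons s l ih =>
    intro f r hf
    match f, hf with
    | f + 1, hf =>
      have h1 : l.length ≤ f := by simpa using hf
      calc pvQrun sequences (f + 1) ((s :: l) ++ r)
          = s :: pvQrun sequences f (l ++ (r ++ pvChild sequences s)) := by
            simp [pvQrun, List.append_assoc]
        _ = s :: (l ++ pvQrun sequences (f - l.length)
              ((r ++ pvChild sequences s) ++ l.flatMap (pvChild sequences))) := by
            rw [ih f (r ++ pvChild sequences s) h1]
        _ = (s :: l) ++ pvQrun sequences (f + 1 - (s :: l).length)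
              (r ++ (s :: l).flatMap (pvChild sequences)) := by
            simp [List.append_assoc]

theorem pvBfs_eq_pvQrun (sequences : List (String × Int × Int)) :
    ∀ (f : Nat) (q : List (String × Int × Int)) (i : Nat), i ≤ q.length →
      pvBfs (pvBuildMap sequences) f q i = pvQrun sequences f (q.drop i) := by
  intro f
  induction f with
  | zero =>
    intro q i _
    cases hq : q.drop i with
    | nil => rfl
    | cons a t => rfl
  | succ f ih =>
    intro q i hi
    by_cases h : i < q.length
    · have hdrop : q.drop i = q[i] :: q.drop (i + 1) := List.drop_eq_getElem_cons h
      rw [pvBfs, dif_pos h, hdrop, pvQrun]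
      rw [show List.map (fun t => (q[i].1 ++ "_" ++ t.1, q[i].2.1, t.2.2))
            ((pvBuildMap sequences).getD q[i].2.2 []) = pvChild sequences q[i] from rfl]
      have hlen : i + 1 ≤ (q ++ pvChild sequences q[i]).length := by
        simp; omega
      rw [ih _ _ hlen]
      congr 1
      rw [List.drop_append_of_le_length (by omega)]
    · have : i = q.length := by omega
      subst this
      rw [pvBfs, dif_neg h, List.drop_length]
      rfl

theorem pvChild_len (sequences : List (String × Int × Int)) (x : String × Int × Int) :
    (pvChild sequences x).length ≤ sequences.length := by
  unfold pvChild
  rw [pvBuildMap_getD, List.length_map]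
  exact List.length_filter_le _ _

theorem pvFlatMap_len (sequences : List (String × Int × Int)) :
    ∀ (l : List (String × Int × Int)) (L : Nat), l.length ≤ L →
      (l.flatMap (pvChild sequences)).length ≤ L * sequences.length := by
  intro l
  induction l with
  | nil => intro L _; simp
  | cons s l ih =>
    intro L hL
    match L, hL with
    | L + 1, hL =>
      have h1 : l.length ≤ L := by simpa using hL
      have := ih L h1
      have hc := pvChild_len sequences s
      simp only [List.flatMap_cons, List.length_append]
      calc (pvChild sequences s).length + (l.flatMap (pvChild sequences)).length
          ≤ sequences.length + L * sequences.length := by omega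
        _ = (L + 1) * sequences.length := by ring

theorem pvQrun_nil (sequences : List (String × Int × Int)) (f : Nat) :
    pvQrun sequences f [] = [] := by
  cases f <;> rfl

theorem pvMain (sequences : List (String × Int × Int)) :
    ∀ (m : Nat) (l : List (String × Int × Int)) (L fq fg : Nat),
      (∀ x ∈ l, pvOk sequences m x) → l.length ≤ L →
      pvFuelB sequences.length m L ≤ fq → m < fg →
      pvQrun sequences fq l = pvGenA (pvBuildMap sequences) fg l := by
  intro m
  induction m with
  | zero =>
    intro l L fq fg hok hL hfq hfg
    match fg, hfg with
    | g + 1, _ =>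
      have hnil : l.flatMap (pvChild sequences) = [] := by
        rw [List.flatMap_eq_nil_iff]
        intro x hx
        exact pvOk_zero_child sequences x (hok x hx)
      have hq : pvQrun sequences fq l = l := by
        have := pvQrun_append sequences l fq [] (by simpa [pvFuelB] using le_trans hL hfq)
        simpa [hnil, pvQrun_nil] using this
      rw [hq]
      simp only [pvGenA]
      rw [pvGenA_next sequences l []]
      simp [hnil]
  | succ m ih =>
    intro l L fq fg hok hL hfq hfg
    match fg, hfg with
    | g + 1, hfg =>
      have hfq' : l.length ≤ fq := by
        have : L ≤ fq := le_trans (by simp [pvFuelB]) hfq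
        omega
      have hsplit := pvQrun_append sequences l fq [] hfq'
      simp only [List.append_nil, List.nil_append] at hsplit
      rw [hsplit]
      simp only [pvGenA]
      rw [pvGenA_next sequences l []]
      simp only [List.nil_append]
      by_cases hnil : l.flatMap (pvChild sequences) = []
      · simp [hnil, pvQrun_nil]
      · rw [if_neg hnil]
        congr 1
        exact ih (l.flatMap (pvChild sequences)) (L * sequences.length)
          (fq - l.length) g
          (by
            intro x hx
            rw [List.mem_flatMap] at hx
            obtain ⟨p, hp, hxp⟩ := hx
            exact pvOk_child sequences m p (hok p hp) x hxp)
          (pvFlatMap_len sequences l L hL)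
          (by
            have : L + pvFuelB sequences.length m (L * sequences.length) ≤ fq := by
              simpa [pvFuelB] using hfq
            omega)
          (by omega)

-- ===== VERDICT (by name: the statement is the Claim_ definition above) =====
theorem generate_all_proteins_spec : Claim_equal_generate_all_proteins := by
  intro sequences _ hpre
  unfold Spec_generate_all_proteins generate_all_proteins generate_all_proteins_alt
  rw [pvBfs_eq_pvQrun sequences _ sequences 0 (by simp), List.drop_zero]
  refine (pvMain sequences sequences.length sequences sequences.length
    (pvFuelB sequences.length sequences.length sequences.length) (sequences.length + 1)
    ?_ le_rfl le_rfl (by omega)).symm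
  intro x _ u _ _
  unfold Pre_generate_all_proteins at hpre
  rw [hpre]
  exact List.not_mem_nil
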